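-- pv_equiv track=rewrite | github.com/pgolo/wsgenerator | wordsearch/brute_force_recursion.py | trace_grids
-- ===== SOURCE A (Python) =====
-- import copy
--
-- def placements(grid, word):
--     solutions = []
--     grid_height = len(grid)
--     grid_width = len(grid[0])
--     for y in range(grid_height):
--         for x in range(grid_width):
--             for direction in [(0, 1), (1, 0), (1, -1)]:
--                 for letters in [word, ''.join(reversed(word))]:
--                     not_fit = False
--                     solution = copy.deepcopy(grid)
--                     for i in range(len(letters)):
--                         this_y = y + i * direction[0]
--                         this_x = x + i * direction[1]
--                         if not (0 <= this_y < grid_height and 0 <= this_x < grid_width) or (grid[this_y][this_x] != '' and grid[this_y][this_x] != letters[i]):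
--                             not_fit = True
--                             break
--                         solution[this_y][this_x] = letters[i]
--                     if not_fit:
--                         continue
--                     solutions.append(solution)
--     return solutions
--
-- def trace_grids(solutions, words, word_index):
--     word = words[word_index]
--     partial_solutions = []
--     for grid in solutions:
--         fits = placements(grid, word)
--         partial_solutions += fits
--     word_index += 1
--     if word_index == len(words):
--         return partial_solutions
--     return trace_grids(partial_solutions, words, word_index)
-- ===== SOURCE B (Python) =====
-- def _fits(grid, height, width, cells):
--     return all(0 <= cy < height and 0 <= cx < width and grid[cy][cx] in ('', ch)
--                for cy, cx, ch in cells)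
--
-- def _write(grid, cells):
--     placed = [row[:] for row in grid]
--     for cy, cx, ch in cells:
--         placed[cy][cx] = ch
--     return placed
--
-- def placements(grid, word):
--     height, width = len(grid), len(grid[0])
--     return [_write(grid, cells)
--             for y in range(height)
--             for x in range(width)
--             for dy, dx in ((0, 1), (1, 0), (1, -1))
--             for cells in ([(y + i * dy, x + i * dx, ch) for i, ch in enumerate(letters)]
--                           for letters in (word, word[::-1]))
--             if _fits(grid, height, width, cells)]
--
-- def trace_grids(solutions, words, word_index):
--     sols = [p for g in solutions for p in placements(g, words[word_index])]
--     for idx in range(word_index + 1, len(words)):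
--         sols = [p for g in sols for p in placements(g, words[idx])]
--     return sols
-- ===== Notes on version B (the rewrite author's own statement) =====
-- stated objective: alternative
-- what changed: placements is rewritten from copy-then-mutate-with-break (incrementally writing letters into a deep copy and bailing out mid-write on the first misfit) to check-then-build (materialise the cell list of each candidate placement, test fit in one all() pass against the original grid, and only then write), and trace_grids's tail recursion becomes an explicit loop over range(word_index+1, len(words)) rebuilding the solution list with flat comprehensions.
import Mathlib
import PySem

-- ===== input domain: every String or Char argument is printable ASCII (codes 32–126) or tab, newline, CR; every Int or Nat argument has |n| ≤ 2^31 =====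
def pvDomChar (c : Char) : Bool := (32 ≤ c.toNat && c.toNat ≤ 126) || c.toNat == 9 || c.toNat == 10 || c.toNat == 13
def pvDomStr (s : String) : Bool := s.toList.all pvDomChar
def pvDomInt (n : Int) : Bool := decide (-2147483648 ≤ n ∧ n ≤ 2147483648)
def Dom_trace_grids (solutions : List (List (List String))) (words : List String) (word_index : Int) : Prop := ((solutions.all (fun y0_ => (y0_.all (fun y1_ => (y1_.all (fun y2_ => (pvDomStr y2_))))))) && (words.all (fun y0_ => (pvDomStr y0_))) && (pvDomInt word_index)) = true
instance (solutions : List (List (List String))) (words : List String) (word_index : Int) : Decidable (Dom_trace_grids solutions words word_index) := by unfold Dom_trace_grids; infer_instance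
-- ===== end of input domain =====

-- B rewrites placements from copy-then-mutate-with-break to check-then-build (cell list, one all() fit pass,
-- then write) and replaces trace_grids's tail recursion by an iterative loop over the remaining word indices
-- (objective: alternative decomposition). Equivalence of return values on Pre_.

-- ===== PORT A =====
-- grid[this_y][this_x] read; the default "" is never used inside Pre_ (indices are bounds-checked first
-- and Pre_ guarantees every grid is non-empty with rows at least as long as row 0)
def pvCell (grid : List (List String)) (y x : Int) : String :=
  ((PySem.List.pyGet? grid y).bind (fun row => PySem.List.pyGet? row x)).getD ""

-- solution[this_y][this_x] = v (total form; in range whenever reached inside Pre_)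
def pvSet2 (g : List (List String)) (y x : Int) (v : String) : List (List String) :=
  PySem.List.pySetD g y (PySem.List.pySetD (PySem.List.pyGetD g y []) x v)

-- the 'for i in range(len(letters))' loop of placements, with its not_fit/break flag rendered as Option
def placeLetters (grid : List (List String)) (gh gw dy dx y x : Int) :
    List Char → Nat → List (List String) → Option (List (List String))
  | [], _, solution => some solution
  | c :: rest, i, solution =>
      let this_y := y + (i : Int) * dy
      let this_x := x + (i : Int) * dx
      if ¬ (0 ≤ this_y ∧ this_y < gh ∧ 0 ≤ this_x ∧ this_x < gw) ∨
         (pvCell grid this_y this_x ≠ "" ∧ pvCell grid this_y this_x ≠ String.mk [c]) then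
        none
      else
        placeLetters grid gh gw dy dx y x rest (i + 1) (pvSet2 solution this_y this_x (String.mk [c]))

def placements (grid : List (List String)) (word : String) : List (List (List String)) :=
  let grid_height : Int := PySem.List.len grid
  let grid_width : Int := PySem.List.len (PySem.List.pyGetD grid 0 [])  -- grid[0]: IndexError on [] excluded by Pre_
  (PySem.List.pyRange 0 grid_height 1).foldl (fun sols y =>
    (PySem.List.pyRange 0 grid_width 1).foldl (fun sols x =>
      [((0 : Int), (1 : Int)), (1, 0), (1, -1)].foldl (fun sols dir =>
        [word.toList, word.toList.reverse].foldl (fun sols letters =>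
          match placeLetters grid grid_height grid_width dir.1 dir.2 y x letters 0 grid with
          | none => sols                 -- not_fit: continue
          | some sol => sols ++ [sol])   -- solutions.append(solution)
        sols) sols) sols) []

def trace_grids (solutions : List (List (List String))) (words : List String) (word_index : Int) : List (List (List String)) :=
  match h : PySem.List.pyGet? words word_index with
  | none => []  -- Python raises IndexError here; excluded by Pre_
  | some word =>
    let partial_solutions := solutions.foldl (fun acc grid => acc ++ placements grid word) []
    if word_index + 1 = PySem.List.len words then partial_solutions
    else trace_grids partial_solutions words (word_index + 1)
termination_by ((words.length : Int) - word_index).toNat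
decreasing_by
  have hr : PySem.Raise.InRange words.length word_index := by
    by_contra hc
    rw [← PySem.List.pyGet?_eq_none_iff (xs := words)] at hc
    simp [hc] at h
  have : word_index < (words.length : Int) := hr.2
  omega

-- ===== PORT B =====
-- _fits's per-cell test; grid[cy][cx] read via chained pyGetD (default "" unused inside Pre_: bounds are
-- checked first and Pre_ gives non-empty grids with rows at least as long as row 0)
def pvFitCell (grid : List (List String)) (h w : Int) (c : Int × Int × Char) : Bool :=
  decide (0 ≤ c.1 ∧ c.1 < h ∧ 0 ≤ c.2.1 ∧ c.2.1 < w) &&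
  (PySem.List.pyGetD (PySem.List.pyGetD grid c.1 []) c.2.1 "" == "" ||
   PySem.List.pyGetD (PySem.List.pyGetD grid c.1 []) c.2.1 "" == String.mk [c.2.2])

def pvFits (grid : List (List String)) (h w : Int) (cells : List (Int × Int × Char)) : Bool :=
  cells.all (pvFitCell grid h w)

-- _write: the row copies are identity on immutable lists; placed[cy][cx] = ch is pySetD (in range inside Pre_)
def pvWrite (grid : List (List String)) (cells : List (Int × Int × Char)) : List (List String) :=
  cells.foldl (fun g c =>
    PySem.List.pySetD g c.1 (PySem.List.pySetD (PySem.List.pyGetD g c.1 []) c.2.1 (String.mk [c.2.2]))) grid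

-- [(y + i*dy, x + i*dx, ch) for i, ch in enumerate(letters)]
def pvCells (y x dy dx : Int) (letters : List Char) : List (Int × Int × Char) :=
  (PySem.List.enumerate letters 0).map (fun p => (y + p.1 * dy, x + p.1 * dx, p.2))

def placements_alt (grid : List (List String)) (word : String) : List (List (List String)) :=
  let height : Int := (grid.length : Int)
  let width : Int := (grid.headI.length : Int)   -- len(grid[0]); IndexError on [] excluded by Pre_
  (PySem.List.pyRange 0 height 1).flatMap (fun y =>
    (PySem.List.pyRange 0 width 1).flatMap (fun x =>
      [((0 : Int), (1 : Int)), (1, 0), (1, -1)].flatMap (fun d =>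
        ([word.toList, word.toList.reverse].map (fun letters => pvCells y x d.1 d.2 letters)).filterMap
          (fun cells => if pvFits grid height width cells then some (pvWrite grid cells) else none))))

-- words[word_index] / words[idx]; the default "" is never used: Pre_ puts word_index in range and every later
-- idx in range(word_index + 1, len(words)) is a valid index
def trace_grids_alt (solutions : List (List (List String))) (words : List String) (word_index : Int) : List (List (List String)) :=
  let word0 := (PySem.List.pyGet? words word_index).getD ""
  let sols0 := solutions.flatMap (fun grid => placements_alt grid word0)
  (PySem.List.pyRange (word_index + 1) (PySem.List.len words) 1).foldl
    (fun sols idx => sols.flatMap (fun grid => placements_alt grid ((PySem.List.pyGet? words idx).getD ""))) sols0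

-- ===== PRECONDITION & SPEC =====
-- Pre_ excludes (a) word_index out of range(-len(words), len(words)), where Python A raises IndexError at
-- words[word_index], and (b) solutions containing an empty grid or a grid with some row shorter than its first
-- row, on which placements raises IndexError at grid[0] / grid[y][x] (except in the degenerate all-empty-words
-- case, where A still returns — see claim cites).
def Pre_trace_grids (solutions : List (List (List String))) (words : List String) (word_index : Int) : Prop :=
  (∀ g ∈ solutions, g ≠ [] ∧ ∀ row ∈ g, g.headI.length ≤ row.length) ∧
  -(words.length : Int) ≤ word_index ∧ word_index < (words.length : Int)
instance (solutions : List (List (List String))) (words : List String) (word_index : Int) : Decidable (Pre_trace_grids solutions words word_index) := by unfold Pre_trace_grids; infer_instance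

def pvWitness_trace_grids : List (List (List String)) × List String × Int := ([[[""]]], ["a"], 0)

def Spec_trace_grids (solutions : List (List (List String))) (words : List String) (word_index : Int) (out : List (List (List String))) : Prop := out = trace_grids_alt solutions words word_index
instance (solutions : List (List (List String))) (words : List String) (word_index : Int) (out : List (List (List String))) : Decidable (Spec_trace_grids solutions words word_index out) := by unfold Spec_trace_grids; infer_instance

-- ===== CLAIM (what is proved, stated in full; the proofs are below) =====
def Claim_equal_trace_grids : Prop := ∀ (solutions : List (List (List String))) (words : List String) (word_index : Int), Dom_trace_grids solutions words word_index → Pre_trace_grids solutions words word_index → Spec_trace_grids solutions words word_index (trace_grids solutions words word_index)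

-- ===== LEMMAS AND PROOFS =====

-- B's chained pyGetD cell read equals A's bind-based pvCell
theorem pvCell_eq_pyGetD (grid : List (List String)) (y x : Int) :
    PySem.List.pyGetD (PySem.List.pyGetD grid y []) x "" = pvCell grid y x := by
  unfold pvCell
  cases h : PySem.List.pyGet? grid y with
  | none =>
      simp only [PySem.List.pyGetD, h, Option.getD_none, Option.bind_none]
      simp [PySem.List.pyGet?, PySem.List.pyIdx?]
  | some row => simp [PySem.List.pyGetD, h]

-- B's per-cell boolean fit test, read as A's bounds-and-cell proposition
theorem pvFitCell_iff (grid : List (List String)) (gh gw ty tx : Int) (c : Char) :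
    pvFitCell grid gh gw (ty, tx, c) = true ↔
      ((0 ≤ ty ∧ ty < gh ∧ 0 ≤ tx ∧ tx < gw) ∧
       (pvCell grid ty tx = "" ∨ pvCell grid ty tx = String.mk [c])) := by
  unfold pvFitCell
  rw [pvCell_eq_pyGetD]
  simp

-- A's incremental write-with-break loop equals B's check-then-build on the enumerated cells
theorem placeLetters_eq (grid : List (List String)) (gh gw dy dx y x : Int) :
    ∀ (letters : List Char) (i : Nat) (sol : List (List String)),
      placeLetters grid gh gw dy dx y x letters i sol =
        (if pvFits grid gh gw ((PySem.List.enumerate letters (i : Int)).map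
              (fun p => (y + p.1 * dy, x + p.1 * dx, p.2))) then
           some (pvWrite sol ((PySem.List.enumerate letters (i : Int)).map
              (fun p => (y + p.1 * dy, x + p.1 * dx, p.2))))
         else none) := by
  intro letters
  induction letters with
  | nil => intro i sol; simp [placeLetters, pvFits, pvWrite, PySem.List.enumerate_nil]
  | cons c rest ih =>
      intro i sol
      rw [placeLetters, PySem.List.enumerate_cons]
      simp only [List.map_cons, pvFits, List.all_cons]
      by_cases hc : pvFitCell grid gh gw (y + (i : Int) * dy, x + (i : Int) * dx, c) = true
      · have hcond : ¬ (¬ (0 ≤ y + (i : Int) * dy ∧ y + (i : Int) * dy < gh ∧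
              0 ≤ x + (i : Int) * dx ∧ x + (i : Int) * dx < gw) ∨
            (pvCell grid (y + (i : Int) * dy) (x + (i : Int) * dx) ≠ "" ∧
             pvCell grid (y + (i : Int) * dy) (x + (i : Int) * dx) ≠ String.mk [c])) := by
          rw [pvFitCell_iff] at hc
          tauto
        rw [if_neg hcond, ih (i + 1) (pvSet2 sol (y + (i : Int) * dy) (x + (i : Int) * dx) (String.mk [c])),
            show ((i + 1 : Nat) : Int) = ((i : Int) + 1) by push_cast; ring]
        simp only [pvFits, hc, Bool.true_and]
        split
        · simp [pvWrite, pvSet2]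
        · rfl
      · have hcond : ¬ (0 ≤ y + (i : Int) * dy ∧ y + (i : Int) * dy < gh ∧
              0 ≤ x + (i : Int) * dx ∧ x + (i : Int) * dx < gw) ∨
            (pvCell grid (y + (i : Int) * dy) (x + (i : Int) * dx) ≠ "" ∧
             pvCell grid (y + (i : Int) * dy) (x + (i : Int) * dx) ≠ String.mk [c]) := by
          rw [pvFitCell_iff] at hc
          tauto
        rw [if_pos hcond, Bool.not_eq_true] at *
        simp [hc]

theorem placements_eq (grid : List (List String)) (word : String) :
    placements grid word = placements_alt grid word := by
  unfold placements placements_alt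
  simp only [PySem.List.len_eq]
  have hw : PySem.List.pyGetD grid 0 [] = grid.headI := by
    cases grid with
    | nil => rfl
    | cons r rs => simp [PySem.List.pyGetD, PySem.List.pyGet?, PySem.List.pyIdx?]
  rw [hw]
  set H : Int := (grid.length : Int)
  set W : Int := (grid.headI.length : Int)
  have hinner : ∀ (y x : Int) (d : Int × Int) (sols : List (List (List String))),
      [word.toList, word.toList.reverse].foldl (fun sols letters =>
          match placeLetters grid H W d.1 d.2 y x letters 0 grid with
          | none => sols
          | some sol => sols ++ [sol]) sols
      = sols ++ ([word.toList, word.toList.reverse].map (fun letters => pvCells y x d.1 d.2 letters)).filterMap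
          (fun cells => if pvFits grid H W cells then some (pvWrite grid cells) else none) := by
    intro y x d sols
    simp only [List.foldl_cons, List.foldl_nil, List.map_cons, List.map_nil,
               List.filterMap_cons, List.filterMap_nil]
    rw [placeLetters_eq, placeLetters_eq]
    simp only [Nat.cast_zero, pvCells]
    by_cases h1 : pvFits grid H W ((PySem.List.enumerate word.toList 0).map
        (fun p => (y + p.1 * d.1, x + p.1 * d.2, p.2))) <;>
      by_cases h2 : pvFits grid H W ((PySem.List.enumerate word.toList.reverse 0).map
        (fun p => (y + p.1 * d.1, x + p.1 * d.2, p.2))) <;>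
      simp [h1, h2]
  have hdir : ∀ (y x : Int) (sols : List (List (List String))),
      [((0 : Int), (1 : Int)), (1, 0), (1, -1)].foldl (fun sols dir =>
        [word.toList, word.toList.reverse].foldl (fun sols letters =>
          match placeLetters grid H W dir.1 dir.2 y x letters 0 grid with
          | none => sols
          | some sol => sols ++ [sol]) sols) sols
      = sols ++ [((0 : Int), (1 : Int)), (1, 0), (1, -1)].flatMap (fun d =>
          ([word.toList, word.toList.reverse].map (fun letters => pvCells y x d.1 d.2 letters)).filterMap
            (fun cells => if pvFits grid H W cells then some (pvWrite grid cells) else none)) := by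
    intro y x sols
    rw [show (fun sols dir => [word.toList, word.toList.reverse].foldl (fun sols letters =>
          match placeLetters grid H W (Prod.fst dir) (Prod.snd dir) y x letters 0 grid with
          | none => sols
          | some sol => sols ++ [sol]) sols)
        = (fun (sols : List (List (List String))) (d : Int × Int) => sols ++
            ([word.toList, word.toList.reverse].map (fun letters => pvCells y x d.1 d.2 letters)).filterMap
              (fun cells => if pvFits grid H W cells then some (pvWrite grid cells) else none))
        from funext fun sols => funext fun d => hinner y x d sols]
    exact PySem.List.foldl_append_eq_flatMap _ _ _
  have hx : ∀ (y : Int) (sols : List (List (List String))),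
      (PySem.List.pyRange 0 W 1).foldl (fun sols x =>
        [((0 : Int), (1 : Int)), (1, 0), (1, -1)].foldl (fun sols dir =>
          [word.toList, word.toList.reverse].foldl (fun sols letters =>
            match placeLetters grid H W dir.1 dir.2 y x letters 0 grid with
            | none => sols
            | some sol => sols ++ [sol]) sols) sols) sols
      = sols ++ (PySem.List.pyRange 0 W 1).flatMap (fun x =>
          [((0 : Int), (1 : Int)), (1, 0), (1, -1)].flatMap (fun d =>
            ([word.toList, word.toList.reverse].map (fun letters => pvCells y x d.1 d.2 letters)).filterMap
              (fun cells => if pvFits grid H W cells then some (pvWrite grid cells) else none))) := by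
    intro y sols
    rw [show (fun (sols : List (List (List String))) (x : Int) =>
          [((0 : Int), (1 : Int)), (1, 0), (1, -1)].foldl (fun sols dir =>
            [word.toList, word.toList.reverse].foldl (fun sols letters =>
              match placeLetters grid H W dir.1 dir.2 y x letters 0 grid with
              | none => sols
              | some sol => sols ++ [sol]) sols) sols)
        = (fun (sols : List (List (List String))) (x : Int) => sols ++
            [((0 : Int), (1 : Int)), (1, 0), (1, -1)].flatMap (fun d =>
              ([word.toList, word.toList.reverse].map (fun letters => pvCells y x d.1 d.2 letters)).filterMap
                (fun cells => if pvFits grid H W cells then some (pvWrite grid cells) else none)))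
        from funext fun sols => funext fun x => hdir y x sols]
    exact PySem.List.foldl_append_eq_flatMap _ _ _
  rw [show (fun (sols : List (List (List String))) (y : Int) =>
        (PySem.List.pyRange 0 W 1).foldl (fun sols x =>
          [((0 : Int), (1 : Int)), (1, 0), (1, -1)].foldl (fun sols dir =>
            [word.toList, word.toList.reverse].foldl (fun sols letters =>
              match placeLetters grid H W dir.1 dir.2 y x letters 0 grid with
              | none => sols
              | some sol => sols ++ [sol]) sols) sols) sols)
      = (fun (sols : List (List (List String))) (y : Int) => sols ++
          (PySem.List.pyRange 0 W 1).flatMap (fun x =>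
            [((0 : Int), (1 : Int)), (1, 0), (1, -1)].flatMap (fun d =>
              ([word.toList, word.toList.reverse].map (fun letters => pvCells y x d.1 d.2 letters)).filterMap
                (fun cells => if pvFits grid H W cells then some (pvWrite grid cells) else none))))
      from funext fun sols => funext fun y => hx y sols]
  rw [PySem.List.foldl_append_eq_flatMap, List.nil_append]

theorem pyGet?_isSome_of_inRange (words : List String) (wi : Int)
    (h1 : -(words.length : Int) ≤ wi) (h2 : wi < (words.length : Int)) :
    ∃ w, PySem.List.pyGet? words wi = some w := by
  cases h : PySem.List.pyGet? words wi with
  | some w => exact ⟨w, rfl⟩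
  | none =>
      rw [PySem.List.pyGet?_eq_none_iff] at h
      exact absurd ⟨h1, h2⟩ h

theorem trace_grids_eq_fold (words : List String) :
    ∀ (n : Nat) (sols : List (List (List String))) (wi : Int),
      -(words.length : Int) ≤ wi → wi < (words.length : Int) →
      ((words.length : Int) - wi).toNat ≤ n →
      trace_grids sols words wi =
        (PySem.List.pyRange wi (words.length : Int) 1).foldl
          (fun sols idx => sols.flatMap (fun grid => placements_alt grid ((PySem.List.pyGet? words idx).getD ""))) sols := by
  intro n
  induction n with
  | zero => intro sols wi h1 h2 hn; omega
  | succ n ih =>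
      intro sols wi h1 h2 hn
      obtain ⟨w, hw⟩ := pyGet?_isSome_of_inRange words wi h1 h2
      rw [PySem.List.pyRange_one_cons h2, List.foldl_cons, hw]
      simp only [Option.getD_some]
      rw [trace_grids, hw]
      simp only []
      rw [show (fun (acc : List (List (List String))) (grid : List (List String)) => acc ++ placements grid w)
            = (fun (acc : List (List (List String))) (grid : List (List String)) => acc ++ placements_alt grid w)
          from funext fun acc => funext fun grid => by rw [placements_eq]]
      rw [PySem.List.foldl_append_eq_flatMap, List.nil_append]
      by_cases hend : wi + 1 = (words.length : Int)
      · rw [if_pos (by rw [PySem.List.len_eq]; exact hend), hend,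
            PySem.List.pyRange_one_eq_nil (by omega), List.foldl_nil]
      · rw [if_neg (by rw [PySem.List.len_eq]; exact hend)]
        exact ih _ (wi + 1) (by omega) (by omega) (by omega)

-- ===== VERDICT (by name: the statement is the Claim_ definition above) =====
theorem trace_grids_spec : Claim_equal_trace_grids := by
  intro sols words wi _ hpre
  unfold Spec_trace_grids
  rw [trace_grids_eq_fold words ((words.length : Int) - wi).toNat sols wi hpre.2.1 hpre.2.2 le_rfl,
      PySem.List.pyRange_one_cons hpre.2.2, List.foldl_cons]
  rfl
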